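-- pv_equiv track=rewrite | github.com/MrHamdulay/csc3-capstone | examples/data/Assignment_7/sldcar001/push.py | push_up
-- ===== SOURCE A (Python) =====
-- def push_up(grid):
--     for row in range(4):
--         add=[]
--         for col in range(4):
--             a=grid[col][row]
--             if a!=0:
--                 add.append(a)
--         g=0
--         if len(add)!=0:
--             while g < len(add):
--                 if g+1!=len(add):
--                     if add[g]==add[g+1]:
--                         add[g]=add[g]*2
--                         del add[g+1]
--                 g+=1
--         while len(add)!=4:
--             add.append(0)
--         for ncol in range(4):
--             grid[ncol][row]=add[ncol]
--     return(grid)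
-- ===== SOURCE B (Python) =====
-- def push_up(grid):
--     for r in range(4):
--         res = []
--         merged = False
--         for c in range(4):
--             v = grid[c][r]
--             if v == 0:
--                 continue
--             if res and not merged and res[-1] == v:
--                 res[-1] = 2 * v
--                 merged = True
--             else:
--                 res.append(v)
--                 merged = False
--         res += [0] * (4 - len(res))
--         for c, v in enumerate(res):
--             grid[c][r] = v
--     return grid
-- ===== Notes on version B (the rewrite author's own statement) =====
-- stated objective: simpler
-- what changed: The per-column merge is rebuilt as a single forward pass that appends each nonzero tile to a result list, doubling the last entry under a just-merged flag, instead of A's gather-then-rescan while loop that mutates the list with index writes and del; padding becomes a single list extension instead of an append loop.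
import Mathlib
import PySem

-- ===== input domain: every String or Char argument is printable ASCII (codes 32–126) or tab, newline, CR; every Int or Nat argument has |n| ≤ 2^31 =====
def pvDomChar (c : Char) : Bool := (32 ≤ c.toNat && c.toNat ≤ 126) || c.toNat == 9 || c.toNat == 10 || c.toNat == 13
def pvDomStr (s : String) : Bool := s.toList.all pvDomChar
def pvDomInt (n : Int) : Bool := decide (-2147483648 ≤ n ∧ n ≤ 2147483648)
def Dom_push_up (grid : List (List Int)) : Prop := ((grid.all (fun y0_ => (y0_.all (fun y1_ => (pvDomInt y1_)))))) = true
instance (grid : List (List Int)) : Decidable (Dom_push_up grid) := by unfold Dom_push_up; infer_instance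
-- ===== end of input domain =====

-- B re-implements A's per-column 2048 merge (index-and-del while loop) as a single
-- forward append-based build with a just-merged flag; objective: simpler. Both the
-- Python A and the Python B mutate `grid` in place and return it — the equivalence
-- proved here is about the returned value (the mutation is the same in both).

-- ===== PORT A =====
-- Python's `while g < len(add): …` with in-place update/del; transliterated as
-- recursion on the loop state (add, g); terminates because len(add) - g decreases.
def pushA_merge (add : List Int) (g : Nat) : List Int :=
  if _h : g < add.length then
    if g + 1 ≠ add.length ∧ add.getD g 0 = add.getD (g + 1) 0 then
      pushA_merge ((add.set g (add.getD g 0 * 2)).eraseIdx (g + 1)) (g + 1)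
    else
      pushA_merge add (g + 1)
  else add
termination_by add.length - g
decreasing_by
  · have : ((add.set g (add.getD g 0 * 2)).eraseIdx (g + 1)).length = add.length - 1 := by
      rw [List.length_eraseIdx_of_lt (by simp; omega)]; simp
    omega
  · omega

-- Python's `while len(add)!=4: add.append(0)`; the `<` is only a totality guard:
-- on every reachable `add` the length is at most 4, where `< 4` and `≠ 4` agree.
def pushA_pad (add : List Int) : List Int :=
  if add.length < 4 then pushA_pad (add ++ [0]) else add
termination_by 4 - add.length

-- `for col in range(4): a=grid[col][row]; if a!=0: add.append(a)`
def pushA_gather (grid : List (List Int)) (row : Int) : List Int :=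
  (PySem.List.pyRange 0 4 1).foldl
    (fun add col =>
      let a := PySem.List.pyGetD (PySem.List.pyGetD grid col []) row 0
      if a ≠ 0 then add ++ [a] else add) []

-- `for ncol in range(4): grid[ncol][row]=add[ncol]`
def pushA_write (grid : List (List Int)) (row : Int) (add : List Int) : List (List Int) :=
  (PySem.List.pyRange 0 4 1).foldl
    (fun grid ncol =>
      PySem.List.pySetD grid ncol
        (PySem.List.pySetD (PySem.List.pyGetD grid ncol []) row (PySem.List.pyGetD add ncol 0)))
    grid

def push_up (grid : List (List Int)) : List (List Int) :=
  (PySem.List.pyRange 0 4 1).foldl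
    (fun grid row =>
      let add := pushA_gather grid row
      let add := if add.length ≠ 0 then pushA_merge add 0 else add
      let add := pushA_pad add
      pushA_write grid row add)
    grid

-- ===== PORT B =====
-- one forward pass: append each nonzero tile, or double the last result entry
-- when it equals the tile and was not itself just formed by a merge
def pushB_step (st : List Int × Bool) (v : Int) : List Int × Bool :=
  if v = 0 then st
  else if st.1 ≠ [] ∧ st.2 = false ∧ PySem.List.pyGetD st.1 (-1) 0 = v then
    (PySem.List.pySetD st.1 (-1) (2 * v), true)
  else (st.1 ++ [v], false)

def pushB_row (grid : List (List Int)) (r : Int) : List Int :=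
  ((PySem.List.pyRange 0 4 1).foldl
    (fun st c => pushB_step st (PySem.List.pyGetD (PySem.List.pyGetD grid c []) r 0))
    ([], false)).1

-- `for c, v in enumerate(res): grid[c][r] = v`
def pushB_write (grid : List (List Int)) (r : Int) (res : List Int) : List (List Int) :=
  (PySem.List.enumerate res).foldl
    (fun grid cv =>
      PySem.List.pySetD grid cv.1
        (PySem.List.pySetD (PySem.List.pyGetD grid cv.1 []) r cv.2))
    grid

def push_up_alt (grid : List (List Int)) : List (List Int) :=
  (PySem.List.pyRange 0 4 1).foldl
    (fun grid r =>
      let res := pushB_row grid r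
      let res := res ++ List.replicate (4 - res.length) 0
      pushB_write grid r res)
    grid

-- ===== PRECONDITION & SPEC =====
-- Python A raises IndexError unless the grid has at least 4 rows and each of the
-- first 4 rows has at least 4 entries (rows/entries beyond that are untouched).
def Pre_push_up (grid : List (List Int)) : Prop :=
  4 ≤ grid.length ∧ ∀ row ∈ grid.take 4, 4 ≤ row.length
instance (grid : List (List Int)) : Decidable (Pre_push_up grid) := by
  unfold Pre_push_up; infer_instance

def pvWitness_push_up : List (List Int) :=
  [[2, 0, 2, 4], [2, 4, 0, 4], [0, 4, 2, 8], [4, 0, 2, 8]]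

def Spec_push_up (grid : List (List Int)) (out : List (List Int)) : Prop := out = push_up_alt grid
instance (grid : List (List Int)) (out : List (List Int)) : Decidable (Spec_push_up grid out) := by unfold Spec_push_up; infer_instance

-- ===== CLAIM (what is proved, stated in full; the proofs are below) =====
def Claim_equal_push_up : Prop := ∀ (grid : List (List Int)), Dom_push_up grid → Pre_push_up grid → Spec_push_up grid (push_up grid)

-- ===== LEMMAS AND PROOFS =====

def pushFA : List Int → List Int
  | [] => []
  | [x] => [x]
  | x :: y :: t => if x = y then x * 2 :: pushFA t else x :: pushFA (y :: t)

theorem getD_mid (pre : List Int) (x : Int) (t : List Int) :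
    (pre ++ x :: t).getD pre.length 0 = x := by
  rw [List.getD_append_right _ _ _ _ (le_refl _)]; simp

theorem merge_pre (suf : List Int) : ∀ pre : List Int,
    pushA_merge (pre ++ suf) pre.length = pre ++ pushFA suf := by
  induction suf using pushFA.induct with
  | case1 => intro pre; rw [pushA_merge]; simp [pushFA]
  | case2 x =>
      intro pre
      rw [pushA_merge, dif_pos (by simp), if_neg (by simp), pushA_merge,
        dif_neg (by simp)]
      simp [pushFA]
  | case3 y t ih =>
      intro pre
      have hx : (pre ++ y :: y :: t).getD pre.length 0 = y := getD_mid ..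
      have hy : (pre ++ y :: y :: t).getD (pre.length + 1) 0 = y := by
        rw [show pre ++ y :: y :: t = (pre ++ [y]) ++ y :: t by simp,
          show pre.length + 1 = (pre ++ [y]).length by simp]
        exact getD_mid ..
      rw [pushA_merge, dif_pos (by simp), if_pos ⟨by simp, by rw [hx, hy]⟩,
        hx]
      have hset : (pre ++ y :: y :: t).set pre.length (y * 2) = pre ++ (y * 2) :: y :: t := by
        rw [List.set_append]; simp
      have herase : (pre ++ (y * 2) :: y :: t).eraseIdx (pre.length + 1)
          = (pre ++ [y * 2]) ++ t := by
        rw [show pre ++ (y * 2) :: y :: t = (pre ++ [y * 2]) ++ y :: t by simp,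
          List.eraseIdx_append_of_length_le (by simp)]
        simp
      rw [hset, herase, show pre.length + 1 = (pre ++ [y * 2]).length by simp, ih]
      simp [pushFA]
  | case4 x y t h ih =>
      intro pre
      have hx : (pre ++ x :: y :: t).getD pre.length 0 = x := getD_mid ..
      have hy : (pre ++ x :: y :: t).getD (pre.length + 1) 0 = y := by
        rw [show pre ++ x :: y :: t = (pre ++ [x]) ++ y :: t by simp,
          show pre.length + 1 = (pre ++ [x]).length by simp]
        exact getD_mid ..
      rw [pushA_merge, dif_pos (by simp),
        if_neg (by rw [hx, hy]; rintro ⟨-, h'⟩; exact h h'),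
        show pre ++ x :: y :: t = (pre ++ [x]) ++ y :: t by simp,
        show pre.length + 1 = (pre ++ [x]).length by simp, ih]
      simp [pushFA, h]

theorem pad_eq (m : List Int) : pushA_pad m = m ++ List.replicate (4 - m.length) 0 := by
  by_cases h : m.length < 4
  · rw [pushA_pad, if_pos h]
    rw [pad_eq (m ++ [0])]
    simp only [List.append_assoc, List.length_append, List.length_cons, List.length_nil]
    congr 1
    rw [show 4 - m.length = (4 - (m.length + 1)) + 1 by omega]
    simp [List.replicate_succ]
  · rw [pushA_pad, if_neg h]
    rw [show 4 - m.length = 0 by omega]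
    simp
termination_by 4 - m.length
decreasing_by simp; omega

theorem setD_last (acc : List Int) (x v : Int) :
    PySem.List.pySetD (acc ++ [x]) (-1) v = acc ++ [v] := by
  simp [PySem.List.pySetD, PySem.List.pySet?, PySem.List.pyIdx?]

theorem B_skip_zero (l : List Int) (st : List Int × Bool) :
    List.foldl pushB_step st l = List.foldl pushB_step st (l.filter (· ≠ 0)) := by
  induction l generalizing st with
  | nil => rfl
  | cons x t ih =>
      by_cases hx : x = 0
      · simp [hx, List.filter, pushB_step, ih]
      · simp only [List.foldl, List.filter]
        simp [hx, ih]

theorem B_run (n : Nat) : ∀ suf : List Int, suf.length ≤ n → (∀ v ∈ suf, v ≠ 0) →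
    (∀ (pre : List Int) (x : Int), x ≠ 0 →
      (List.foldl pushB_step (pre ++ [x], false) suf).1 = pre ++ pushFA (x :: suf)) ∧
    (∀ pre : List Int,
      (List.foldl pushB_step (pre, true) suf).1 = pre ++ pushFA suf) := by
  induction n with
  | zero =>
      intro suf hlen _
      have : suf = [] := List.eq_nil_of_length_eq_zero (by omega)
      subst this
      exact ⟨fun pre x _ => by simp [pushFA], fun pre => by simp [pushFA]⟩
  | succ n ih =>
      intro suf hlen hnz
      match suf with
      | [] => exact ⟨fun pre x _ => by simp [pushFA], fun pre => by simp [pushFA]⟩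
      | y :: t =>
          have hy : y ≠ 0 := hnz y (by simp)
          have ht : ∀ v ∈ t, v ≠ 0 := fun v hv => hnz v (by simp [hv])
          have htl : t.length ≤ n := by simp at hlen; omega
          constructor
          · intro pre x hx
            have hstep : pushB_step (pre ++ [x], false) y =
                (if x = y then (pre ++ [2 * y], true) else ((pre ++ [x]) ++ [y], false)) := by
              by_cases hxy : x = y
              · rw [if_pos hxy]
                unfold pushB_step
                rw [if_neg hy,
                  if_pos ⟨by simp, rfl, by rw [PySem.List.pyGetD_neg_one_append_singleton]; exact hxy⟩]
                rw [show (pre ++ [x], false).1 = pre ++ [x] from rfl, setD_last]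
              · rw [if_neg hxy]
                unfold pushB_step
                rw [if_neg hy, if_neg ?_]
                rintro ⟨-, -, hlast⟩
                rw [show (pre ++ [x], false).1 = pre ++ [x] from rfl,
                  PySem.List.pyGetD_neg_one_append_singleton] at hlast
                exact hxy hlast
            rw [List.foldl_cons, hstep]
            by_cases hxy : x = y
            · rw [if_pos hxy, (ih t htl ht).2]
              simp only [pushFA, hxy, if_true]
              rw [show y * 2 = 2 * y from mul_comm y 2]
              simp
            · rw [if_neg hxy, (ih t htl ht).1 (pre ++ [x]) y hy]
              simp [pushFA, hxy]
          · intro pre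
            have hstep : pushB_step (pre, true) y = (pre ++ [y], false) := by
              unfold pushB_step
              rw [if_neg hy, if_neg (by rintro ⟨-, hb, -⟩; simp at hb)]
            rw [List.foldl_cons, hstep, (ih t htl ht).1 pre y hy]

theorem row_core (l4 : List Int) :
    pushA_pad (if (l4.foldl (fun add a => if a ≠ 0 then add ++ [a] else add) []).length ≠ 0
               then pushA_merge (l4.foldl (fun add a => if a ≠ 0 then add ++ [a] else add) []) 0
               else l4.foldl (fun add a => if a ≠ 0 then add ++ [a] else add) [])
      = (List.foldl pushB_step ([], false) l4).1
          ++ List.replicate (4 - (List.foldl pushB_step ([], false) l4).1.length) 0 := by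
  have hg : l4.foldl (fun add a => if a ≠ 0 then add ++ [a] else add) []
      = l4.filter (· ≠ 0) := by
    have := PySem.List.foldl_append_if (fun a : Int => decide (a ≠ 0)) id l4 []
    simpa using this
  rw [hg, B_skip_zero]
  cases hl : l4.filter (· ≠ 0) with
  | nil => simp [pad_eq]
  | cons x t =>
      have hx : x ≠ 0 := by
        have : x ∈ l4.filter (· ≠ 0) := by rw [hl]; simp
        simpa using (List.of_mem_filter this)
      have ht : ∀ v ∈ t, v ≠ 0 := by
        intro v hv
        have : v ∈ l4.filter (· ≠ 0) := by rw [hl]; simp [hv]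
        simpa using (List.of_mem_filter this)
      rw [if_pos (by simp)]
      have hA : pushA_merge (x :: t) 0 = pushFA (x :: t) := by
        have := merge_pre (x :: t) []
        simpa using this
      have hstep : pushB_step ([], false) x = ([] ++ [x], false) := by
        unfold pushB_step
        rw [if_neg hx, if_neg (by rintro ⟨hne, -, -⟩; simp at hne)]
      have hB : (List.foldl pushB_step ([], false) (x :: t)).1 = pushFA (x :: t) := by
        rw [List.foldl_cons, hstep, (B_run t.length t (le_refl _) ht).1 [] x hx]
        simp
      rw [hA, hB, pad_eq]

theorem write_eq (grid : List (List Int)) (r : Int) (res : List Int)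
    (h : res.length = 4) : pushA_write grid r res = pushB_write grid r res := by
  match res, h with
  | [a, b, c, d], _ => rfl

theorem row_full (grid : List (List Int)) (r : Int) :
    (let add := pushA_gather grid r
     let add := if add.length ≠ 0 then pushA_merge add 0 else add
     let add := pushA_pad add
     pushA_write grid r add)
    = (let res := pushB_row grid r
       let res := res ++ List.replicate (4 - res.length) 0
       pushB_write grid r res) := by
  have hA : pushA_gather grid r
      = ([0, 1, 2, 3] : List Int).foldl
          (fun add c => if PySem.List.pyGetD (PySem.List.pyGetD grid c []) r 0 ≠ 0
                        then add ++ [PySem.List.pyGetD (PySem.List.pyGetD grid c []) r 0]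
                        else add) [] := rfl
  have hB : pushB_row grid r
      = (([0, 1, 2, 3] : List Int).foldl
          (fun st c => pushB_step st (PySem.List.pyGetD (PySem.List.pyGetD grid c []) r 0))
          ([], false)).1 := rfl
  have e1 : (([0, 1, 2, 3] : List Int).map
        (fun c => PySem.List.pyGetD (PySem.List.pyGetD grid c []) r 0)).foldl
        (fun add a => if a ≠ 0 then add ++ [a] else add) []
      = ([0, 1, 2, 3] : List Int).foldl
          (fun add c => if PySem.List.pyGetD (PySem.List.pyGetD grid c []) r 0 ≠ 0
                        then add ++ [PySem.List.pyGetD (PySem.List.pyGetD grid c []) r 0]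
                        else add) [] := List.foldl_map
  have e2 : (([0, 1, 2, 3] : List Int).map
        (fun c => PySem.List.pyGetD (PySem.List.pyGetD grid c []) r 0)).foldl pushB_step ([], false)
      = ([0, 1, 2, 3] : List Int).foldl
          (fun st c => pushB_step st (PySem.List.pyGetD (PySem.List.pyGetD grid c []) r 0))
          ([], false) := List.foldl_map
  have hBl : ∀ (l : List Int) (st : List Int × Bool),
      (List.foldl pushB_step st l).1.length ≤ st.1.length + l.length := by
    intro l
    induction l with
    | nil => intro st; simp
    | cons x t ih =>
        intro st
        rw [List.foldl_cons]
        refine le_trans (ih _) ?_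
        have : (pushB_step st x).1.length ≤ st.1.length + 1 := by
          unfold pushB_step
          split_ifs <;> simp [PySem.List.length_pySetD]
        simp only [List.length_cons]
        omega
  have hblen : (pushB_row grid r).length ≤ 4 := by
    rw [hB, ← e2]
    simpa using hBl (([0, 1, 2, 3] : List Int).map
      (fun c => PySem.List.pyGetD (PySem.List.pyGetD grid c []) r 0)) ([], false)
  have heq : pushA_pad (if (pushA_gather grid r).length ≠ 0
        then pushA_merge (pushA_gather grid r) 0 else pushA_gather grid r)
      = pushB_row grid r ++ List.replicate (4 - (pushB_row grid r).length) 0 := by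
    rw [hA, hB, ← e1, ← e2]
    exact row_core _
  show pushA_write grid r _ = pushB_write grid r _
  rw [heq]
  exact write_eq grid r _ (by simp; omega)

theorem ports_eq (grid : List (List Int)) : push_up grid = push_up_alt grid := by
  unfold push_up push_up_alt
  congr 1
  funext g r
  exact row_full g r

-- ===== VERDICT (by name: the statement is the Claim_ definition above) =====
theorem push_up_spec : Claim_equal_push_up := by
  intro grid _ _
  unfold Spec_push_up
  exact ports_eq grid
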